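-- pv_equiv track=rewrite | github.com/EMMoasis/BothMarkets | scanner/kalshi_client.py | _get_sport
-- ===== SOURCE A (Python) =====
-- _SPORT_SERIES: dict[str, str] = {
--     "KXCS2GAME":  "CS2",
--     "KXCS2MAP":   "CS2",
--     "KXCS2":      "CS2",
--     "KXNBAWIN":   "NBA",
--     "KXNBA":      "NBA",
--     "KXMLBWIN":   "MLB",
--     "KXMLB":      "MLB",
--     "KXNHLWIN":   "NHL",
--     "KXNHL":      "NHL",
--     "KXNFLWIN":   "NFL",
--     "KXNFL":      "NFL",
--     "KXSOCCER":   "SOCCER",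
--     "KXLOLGAME":  "LOL",
--     "KXLOLMAP":   "LOL",
--     "KXLOLWIN":   "LOL",
--     "KXLOL":      "LOL",
--     "KXVALORANTMAP": "VALORANT",
--     "KXVALORANT": "VALORANT",
--     "KXDOTA2GAME": "DOTA2",
--     "KXDOTA2":    "DOTA2",
--     "KXROCKETLEAGUE": "RL",
--     "KXRL":       "RL",
-- }
--
-- def _get_sport(series_ticker: str, ticker: str) -> str | None:
--     """Return sport code if this market belongs to a known sports series, else None."""
--     # Exact match on series_ticker
--     if series_ticker in _SPORT_SERIES:
--         return _SPORT_SERIES[series_ticker]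
--     # Prefix match for variants (e.g. KXCS2GAME-26FEB...)
--     for prefix, sport in _SPORT_SERIES.items():
--         if series_ticker.startswith(prefix):
--             return sport
--     # Fallback: check ticker itself
--     ticker_upper = ticker.upper()
--     for prefix, sport in _SPORT_SERIES.items():
--         if ticker_upper.startswith(prefix):
--             return sport
--     return None
-- ===== SOURCE B (Python) =====
-- _SPORT_SERIES: dict[str, str] = {
--     "KXCS2GAME":  "CS2",
--     "KXCS2MAP":   "CS2",
--     "KXCS2":      "CS2",
--     "KXNBAWIN":   "NBA",
--     "KXNBA":      "NBA",
--     "KXMLBWIN":   "MLB",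
--     "KXMLB":      "MLB",
--     "KXNHLWIN":   "NHL",
--     "KXNHL":      "NHL",
--     "KXNFLWIN":   "NFL",
--     "KXNFL":      "NFL",
--     "KXSOCCER":   "SOCCER",
--     "KXLOLGAME":  "LOL",
--     "KXLOLMAP":   "LOL",
--     "KXLOLWIN":   "LOL",
--     "KXLOL":      "LOL",
--     "KXVALORANTMAP": "VALORANT",
--     "KXVALORANT": "VALORANT",
--     "KXDOTA2GAME": "DOTA2",
--     "KXDOTA2":    "DOTA2",
--     "KXROCKETLEAGUE": "RL",
--     "KXRL":       "RL",
-- }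
--
-- # Distinct key lengths, ascending: every possible matching prefix has one of these lengths.
-- _BY_LEN = sorted({len(k) for k in _SPORT_SERIES})
--
--
-- def _lookup(s: str) -> str | None:
--     """Length-indexed prefix lookup: try the slice of s at each key length."""
--     for n in _BY_LEN:
--         sport = _SPORT_SERIES.get(s[:n])
--         if sport is not None:
--             return sport
--     return None
--
--
-- def _get_sport(series_ticker: str, ticker: str) -> str | None:
--     """Return sport code if this market belongs to a known sports series, else None."""
--     return _lookup(series_ticker) or _lookup(ticker.upper())
-- ===== Notes on version B (the rewrite author's own statement) =====
-- stated objective: alternative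
-- what changed: Replaces A's redundant exact-match block plus two insertion-order startswith scans over all 22 keys with a single helper that tries one dict lookup per distinct key length (slice s to each length and look it up), applied to series_ticker and then ticker.upper(); correct because any two table keys comparable by prefix map to the same sport.
import Mathlib
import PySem

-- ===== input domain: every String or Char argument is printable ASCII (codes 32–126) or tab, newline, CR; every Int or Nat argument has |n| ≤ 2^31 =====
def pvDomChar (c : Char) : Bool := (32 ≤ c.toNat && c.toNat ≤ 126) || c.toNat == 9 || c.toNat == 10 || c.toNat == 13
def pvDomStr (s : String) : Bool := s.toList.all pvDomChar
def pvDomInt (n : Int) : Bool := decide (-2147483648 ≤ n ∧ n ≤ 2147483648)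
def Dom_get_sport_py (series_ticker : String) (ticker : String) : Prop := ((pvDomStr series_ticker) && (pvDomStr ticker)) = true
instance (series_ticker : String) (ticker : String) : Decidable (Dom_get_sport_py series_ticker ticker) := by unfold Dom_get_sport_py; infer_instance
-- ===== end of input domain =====

-- B replaces A's insertion-order startswith scans (and the redundant exact-match block) by
-- length-indexed dict lookups over the distinct key lengths; objective: alternative decomposition.

-- shared module-level constant _SPORT_SERIES
def sportSeries : PySem.Dict String String := PySem.Dict.ofList [
  ("KXCS2GAME",  "CS2"),
  ("KXCS2MAP",   "CS2"),
  ("KXCS2",      "CS2"),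
  ("KXNBAWIN",   "NBA"),
  ("KXNBA",      "NBA"),
  ("KXMLBWIN",   "MLB"),
  ("KXMLB",      "MLB"),
  ("KXNHLWIN",   "NHL"),
  ("KXNHL",      "NHL"),
  ("KXNFLWIN",   "NFL"),
  ("KXNFL",      "NFL"),
  ("KXSOCCER",   "SOCCER"),
  ("KXLOLGAME",  "LOL"),
  ("KXLOLMAP",   "LOL"),
  ("KXLOLWIN",   "LOL"),
  ("KXLOL",      "LOL"),
  ("KXVALORANTMAP", "VALORANT"),
  ("KXVALORANT", "VALORANT"),
  ("KXDOTA2GAME", "DOTA2"),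
  ("KXDOTA2",    "DOTA2"),
  ("KXROCKETLEAGUE", "RL"),
  ("KXRL",       "RL")]

-- ===== PORT A =====
-- A's loop 'for prefix, sport in _SPORT_SERIES.items(): if s.startswith(prefix): return sport'
def scanPrefix : List (String × String) → String → Option String
  | [], _ => none
  | (pre, sport) :: rest, s =>
      if PySem.Str.startswith s pre then some sport else scanPrefix rest s

def get_sport_py (series_ticker : String) (ticker : String) : Option String :=
  -- Exact match on series_ticker
  match sportSeries.get? series_ticker with
  | some v => some v
  | none =>
    -- Prefix match for variants
    match scanPrefix sportSeries.items series_ticker with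
    | some v => some v
    | none =>
      -- Fallback: check ticker itself
      let ticker_upper := PySem.Str.upper ticker
      scanPrefix sportSeries.items ticker_upper

-- ===== PORT B =====
-- _BY_LEN = sorted({len(k) for k in _SPORT_SERIES})
def byLen : List Int :=
  PySem.List.sorted (PySem.List.dedup (sportSeries.keys.map (fun k => PySem.Str.len k))) (fun n => n)

-- B's loop 'for n in _BY_LEN: sport = _SPORT_SERIES.get(s[:n]); if sport is not None: return sport'
def lookupByLen : List Int → String → Option String
  | [], _ => none
  | n :: rest, s =>
      match sportSeries.get? (PySem.Str.slice s none (some n)) with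
      | some sport => some sport
      | none => lookupByLen rest s

def get_sport_py_alt (series_ticker : String) (ticker : String) : Option String :=
  match lookupByLen byLen series_ticker with
  | some v => some v
  | none => lookupByLen byLen (PySem.Str.upper ticker)

-- ===== PRECONDITION & SPEC =====
def Spec_get_sport_py (series_ticker : String) (ticker : String) (out : Option String) : Prop := out = get_sport_py_alt series_ticker ticker
instance (series_ticker : String) (ticker : String) (out : Option String) : Decidable (Spec_get_sport_py series_ticker ticker out) := by unfold Spec_get_sport_py; infer_instance

-- ===== CLAIM (what is proved, stated in full; the proofs are below) =====
def Claim_equal_get_sport_py : Prop := ∀ (series_ticker : String) (ticker : String), Dom_get_sport_py series_ticker ticker → Spec_get_sport_py series_ticker ticker (get_sport_py series_ticker ticker)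

-- ===== LEMMAS AND PROOFS =====

-- Any two table keys that are comparable by prefix carry the same sport (finite check).
lemma fact_coh : ∀ p1 ∈ sportSeries.items, ∀ p2 ∈ sportSeries.items,
    p1.1.toList.isPrefixOf p2.1.toList = true → p1.2 = p2.2 := by decide

-- Every key's length occurs in byLen (finite check).
lemma fact_len : ∀ p ∈ sportSeries.items, ((p.1.toList.length : Int)) ∈ byLen := by decide

-- Looking a key up in the table yields its sport (finite check).
lemma fact_get : ∀ p ∈ sportSeries.items, sportSeries.get? p.1 = some p.2 := by decide

-- All lengths in byLen are nonnegative (finite check).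
lemma fact_nonneg : ∀ n ∈ byLen, 0 ≤ n := by decide

-- Two table entries whose keys both prefix the same list carry the same sport.
lemma agree_of_mem {p1 p2 : String × String} {l : List Char}
    (h1 : p1 ∈ sportSeries.items) (h2 : p2 ∈ sportSeries.items)
    (hp1 : p1.1.toList <+: l) (hp2 : p2.1.toList <+: l) : p1.2 = p2.2 := by
  rcases List.prefix_or_prefix_of_prefix hp1 hp2 with h | h
  · exact fact_coh p1 h1 p2 h2 (List.isPrefixOf_iff_prefix.mpr h)
  · exact (fact_coh p2 h2 p1 h1 (List.isPrefixOf_iff_prefix.mpr h)).symm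

lemma scan_some {ps : List (String × String)} {s : String} {v : String}
    (h : scanPrefix ps s = some v) :
    ∃ p ∈ ps, p.1.toList <+: s.toList ∧ p.2 = v := by
  induction ps with
  | nil => simp [scanPrefix] at h
  | cons q rest ih =>
    obtain ⟨pre, sport⟩ := q
    simp only [scanPrefix, PySem.Str.startswith_eq] at h
    by_cases hs : PySem.Chars.startswith s.toList pre.toList = true
    · refine ⟨(pre, sport), by simp, ?_, ?_⟩
      · simpa using (PySem.Chars.startswith_iff s.toList pre.toList).mp hs
      · simp [hs] at h; simpa using h
    · simp [hs] at h
      obtain ⟨p, hp, hpre, hv⟩ := ih h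
      exact ⟨p, by simp [hp], hpre, hv⟩

lemma scan_none {ps : List (String × String)} {s : String}
    (h : scanPrefix ps s = none) :
    ∀ p ∈ ps, ¬ p.1.toList <+: s.toList := by
  induction ps with
  | nil => simp
  | cons q rest ih =>
    obtain ⟨pre, sport⟩ := q
    simp only [scanPrefix, PySem.Str.startswith_eq] at h
    by_cases hs : PySem.Chars.startswith s.toList pre.toList = true
    · simp [hs] at h
    · simp [hs] at h
      intro p hp
      rcases List.mem_cons.mp hp with rfl | hp'
      · intro hpre
        exact hs ((PySem.Chars.startswith_iff s.toList pre.toList).mpr (by simpa using hpre))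
      · exact ih h p hp'

lemma lookup_some {ls : List Int} {s : String} {v : String}
    (hnn : ∀ n ∈ ls, 0 ≤ n)
    (h : lookupByLen ls s = some v) :
    ∃ p ∈ sportSeries.items, p.1.toList <+: s.toList ∧ p.2 = v := by
  induction ls with
  | nil => simp [lookupByLen] at h
  | cons n rest ih =>
    cases hg : sportSeries.get? (PySem.Str.slice s none (some n)) with
    | some sport =>
      simp [lookupByLen, hg] at h
      refine ⟨(PySem.Str.slice s none (some n), sport), PySem.Dict.mem_items_of_get?_eq_some _ hg, ?_, h⟩
      have hn : 0 ≤ n := hnn n (by simp)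
      have ht : (PySem.Str.slice s none (some n)).toList = s.toList.take n.toNat := by
        simp [PySem.List.slice_to _ hn]
      simpa [ht] using List.take_prefix n.toNat s.toList
    | none =>
      simp [lookupByLen, hg] at h
      exact ih (fun m hm => hnn m (by simp [hm])) h

lemma lookup_none {ls : List Int} {s : String}
    (h : lookupByLen ls s = none) :
    ∀ n ∈ ls, sportSeries.get? (PySem.Str.slice s none (some n)) = none := by
  induction ls with
  | nil => simp
  | cons m rest ih =>
    cases hg : sportSeries.get? (PySem.Str.slice s none (some m)) with
    | some sport => simp [lookupByLen, hg] at h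
    | none =>
      simp [lookupByLen, hg] at h
      intro n hn
      rcases List.mem_cons.mp hn with rfl | hn'
      · exact hg
      · exact ih h n hn'

-- If some table key prefixes s, B's length-indexed lookup cannot miss it.
lemma lookup_not_none {s : String} {p : String × String}
    (hp : p ∈ sportSeries.items) (hpre : p.1.toList <+: s.toList) :
    lookupByLen byLen s ≠ none := by
  intro h
  have hlen := fact_len p hp
  have hget := lookup_none h _ hlen
  have htake : (PySem.Str.slice s none (some ((p.1.toList.length : Int)))).toList = p.1.toList := by
    have : (PySem.Str.slice s none (some ((p.1.toList.length : Int)))).toList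
        = s.toList.take p.1.toList.length := by
      simp
    rw [this, ← List.prefix_iff_eq_take.mp hpre]
  have hkey : PySem.Str.slice s none (some ((p.1.toList.length : Int))) = p.1 :=
    String.toList_inj.mp htake
  rw [hkey, fact_get p hp] at hget
  simp at hget

-- Core: A's insertion-order prefix scan and B's length-indexed lookup agree on every string.
lemma core (s : String) : scanPrefix sportSeries.items s = lookupByLen byLen s := by
  cases hA : scanPrefix sportSeries.items s with
  | some v =>
    obtain ⟨p1, hp1, hpre1, hv1⟩ := scan_some hA
    cases hB : lookupByLen byLen s with
    | some w =>
      obtain ⟨p2, hp2, hpre2, hv2⟩ := lookup_some fact_nonneg hB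
      rw [← hv1, ← hv2, agree_of_mem hp1 hp2 hpre1 hpre2]
    | none => exact absurd hB (lookup_not_none hp1 hpre1)
  | none =>
    cases hB : lookupByLen byLen s with
    | some w =>
      obtain ⟨p2, hp2, hpre2, _⟩ := lookup_some fact_nonneg hB
      exact absurd hpre2 (scan_none hA p2 hp2)
    | none => rfl

-- A's redundant exact-match block agrees with the prefix scan.
lemma exact_match {s v : String} (h : sportSeries.get? s = some v) :
    scanPrefix sportSeries.items s = some v := by
  have hmem : (s, v) ∈ sportSeries.items := PySem.Dict.mem_items_of_get?_eq_some _ h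
  cases hA : scanPrefix sportSeries.items s with
  | some w =>
    obtain ⟨p1, hp1, hpre1, hv1⟩ := scan_some hA
    rw [← hv1, agree_of_mem hp1 hmem hpre1 (List.prefix_refl _)]
  | none => exact absurd (List.prefix_refl s.toList) (scan_none hA (s, v) hmem)

-- ===== VERDICT (by name: the statement is the Claim_ definition above) =====
theorem get_sport_py_spec : Claim_equal_get_sport_py := by
  intro series_ticker ticker _
  unfold Spec_get_sport_py get_sport_py get_sport_py_alt
  cases hg : sportSeries.get? series_ticker with
  | some v => rw [← core, exact_match hg]
  | none => rw [← core, ← core]
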